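-- pv_equiv track=rewrite | github.com/yannickloth/W33-Theory | scripts/w33_two_qutrit_pauli.py | analyze_lines
-- ===== SOURCE A (Python) =====
-- from collections import Counter
--
-- def analyze_lines(reps, adj):
--     """Analyze the lines of W(3,3) = maximal totally isotropic subspaces.
--
--     In symplectic geometry, a line is a 2D totally isotropic subspace.
--     Each line has (3^2 - 1)/(3 - 1) = 4 points.
--     Number of lines = 40 * 4 / 4 = 40 (each point on 4 lines).
--     """
--     n = len(reps)
--     adj_s = [set(adj[i]) for i in range(n)]
--
--     # Find all 4-cliques (lines = totally isotropic 2-spaces)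
--     lines = []
--     for i in range(n):
--         for j in adj_s[i]:
--             if j <= i:
--                 continue
--             # Common neighbors of i and j
--             common = adj_s[i] & adj_s[j]
--             for k in common:
--                 if k <= j:
--                     continue
--                 # Check if {i,j,k} is a clique
--                 if k in adj_s[j]:
--                     # Find 4th vertex completing the line
--                     common3 = adj_s[i] & adj_s[j] & adj_s[k]
--                     for l in common3:
--                         if l <= k:
--                             continue
--                         # {i,j,k,l} is a 4-clique = a line
--                         line = tuple(sorted([i, j, k, l]))
--                         lines.append(line)
--
--     # Remove duplicates
--     lines = sorted(set(lines))
--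
--     # Verify: each line is a 2D totally isotropic subspace
--     # In F3^4, a 2D subspace has (9-1)/2 = 4 projective points
--     n_lines = len(lines)
--     lines_per_point = Counter()
--     for line in lines:
--         for p in line:
--             lines_per_point[p] += 1
--
--     return lines, n_lines, lines_per_point
-- ===== SOURCE B (Python) =====
-- from collections import Counter
-- from itertools import combinations
--
-- def analyze_lines(reps, adj):
--     """Flat scan over all 4-element subsets, with the adjacency inverted into
--     below[j] = set of lower endpoints i < j with j in adj[i]."""
--     n = len(reps)
--     below = [set() for _ in range(n)]
--     for i in range(n):
--         for j in adj[i]: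
--             if i < j:
--                 below[j].add(i)
--     lines = sorted(set(
--         (a, b, c, d)
--         for (a, b, c, d) in combinations(range(n), 4)
--         if a in below[b] and a in below[c] and b in below[c]
--         and a in below[d] and b in below[d] and c in below[d]))
--     lines_per_point = Counter(p for line in lines for p in line)
--     return lines, len(lines), lines_per_point
-- ===== Notes on version B (the rewrite author's own statement) =====
-- stated objective: alternative
-- what changed: Replaces the incremental triangle-expansion over neighbour-set intersections by inverting the adjacency into below[j] = {i < j : j in adj[i]} and flat-scanning all 4-element subsets from itertools.combinations, testing the same lower-to-higher pairs against the inverted sets.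
import Mathlib
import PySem

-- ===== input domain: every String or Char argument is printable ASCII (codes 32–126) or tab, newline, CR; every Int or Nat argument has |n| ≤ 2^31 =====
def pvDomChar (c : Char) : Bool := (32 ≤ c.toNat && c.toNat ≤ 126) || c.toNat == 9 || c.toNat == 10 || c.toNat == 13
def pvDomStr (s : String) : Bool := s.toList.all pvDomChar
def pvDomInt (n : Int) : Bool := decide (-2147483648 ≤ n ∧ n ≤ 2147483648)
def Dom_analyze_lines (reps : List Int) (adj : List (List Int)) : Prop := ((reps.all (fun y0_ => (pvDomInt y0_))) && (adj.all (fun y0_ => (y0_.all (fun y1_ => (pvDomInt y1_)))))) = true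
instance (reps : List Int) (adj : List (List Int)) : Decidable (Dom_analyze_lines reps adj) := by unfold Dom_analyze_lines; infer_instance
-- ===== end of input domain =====

-- B replaces A's incremental triangle-expansion over neighbour-set intersections by a flat
-- scan of all 4-element subsets (itertools.combinations) testing the same lower-to-higher
-- adjacency pairs; same results, no speed claim (objective: alternative).


-- Python compares 4-tuples lexicographically; this key maps them to the lexicographic
-- linear order on ℤ ×ₗ (ℤ ×ₗ (ℤ ×ₗ ℤ)), so `sorted` with it is Python's tuple sort, exactly.
def pvKey (q : Int × Int × Int × Int) : Lex (Int × Lex (Int × Lex (Int × Int))) :=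
  toLex (q.1, toLex (q.2.1, toLex (q.2.2.1, q.2.2.2)))

-- A's adj_s = [set(adj[i]) for i in range(n)].
-- The pyGetD default [] is never reached inside Pre_ (0 ≤ i < n ≤ len(adj)).
def pvAdjS (adj : List (List Int)) (n : Int) : List (PySem.Set Int) :=
  (PySem.List.pyRange 0 n).map (fun i => PySem.Set.ofList (PySem.List.pyGetD adj i []))

-- tuple(sorted([i,j,k,l])): the sorted list always has exactly 4 elements, so the
-- wildcard branch is unreachable.
def pvQuad : List Int → Int × Int × Int × Int
  | [a, b, c, d] => (a, b, c, d)
  | _ => (0, 0, 0, 0)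

-- A's nested line-collecting loops (iterating a Python set is ported as iterating the
-- Set's element list; only the append order, erased by sorted(set(..)) below, depends on it).
def pvLinesA (adj_s : List (PySem.Set Int)) (n : Int) : List (Int × Int × Int × Int) :=
  (PySem.List.pyRange 0 n).foldl (fun acc i =>
    (PySem.List.pyGetD adj_s i []).foldl (fun acc j =>
      if j ≤ i then acc
      else
        let common := PySem.Set.inter (PySem.List.pyGetD adj_s i []) (PySem.List.pyGetD adj_s j [])
        common.foldl (fun acc k =>
          if k ≤ j then acc
          else if PySem.Set.contains (PySem.List.pyGetD adj_s j []) k then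
            let common3 := PySem.Set.inter common (PySem.List.pyGetD adj_s k [])
            common3.foldl (fun acc l =>
              if l ≤ k then acc
              else acc ++ [pvQuad (PySem.List.sorted [i, j, k, l] (fun x => x))]) acc
          else acc) acc) acc) []

-- ===== PORT A =====
def analyze_lines (reps : List Int) (adj : List (List Int)) : (List (Int × Int × Int × Int)) × Int × (List (Int × Int)) :=
  let n : Int := PySem.List.len reps
  let adj_s := pvAdjS adj n
  let lines := pvLinesA adj_s n
  -- lines = sorted(set(lines))
  let lines2 := PySem.List.sorted (PySem.Set.ofList lines) pvKey
  let n_lines : Int := PySem.List.len lines2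
  let lines_per_point : PySem.Dict Int Int :=
    lines2.foldl (fun d line =>
      [line.1, line.2.1, line.2.2.1, line.2.2.2].foldl
        (fun d p => PySem.Dict.modify d p 0 (fun v => v + 1)) d) PySem.Dict.empty
  (lines2, n_lines, lines_per_point.items)

-- B's inverted adjacency: below[j] = set of lower endpoints i < j with j in adj[i].
-- list assignment below[j] = … is PySem.List.pySetD (exact for the 0 ≤ j < len(below)
-- indices reached inside Pre_; Python raises IndexError on j ≥ len, outside Pre_).
def pvBelow (adj : List (List Int)) (n : Int) : List (PySem.Set Int) :=
  (PySem.List.pyRange 0 n).foldl (fun below i =>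
    (PySem.List.pyGetD adj i []).foldl (fun below j =>
      if i < j then
        PySem.List.pySetD below j (PySem.Set.add (PySem.List.pyGetD below j []) i)
      else below) below)
    ((PySem.List.pyRange 0 n).map (fun _ => ([] : PySem.Set Int)))

-- B's flat scan: combinations(range(n), 4) yields only 4-element lists, so the wildcard
-- branch is unreachable.
def pvQuadsB (below : List (PySem.Set Int)) (n : Int) : List (Int × Int × Int × Int) :=
  (PySem.List.combinations (PySem.List.pyRange 0 n) 4).filterMap (fun c =>
    match c with
    | [a, b, c', d] =>
      if PySem.Set.contains (PySem.List.pyGetD below b []) a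
          && PySem.Set.contains (PySem.List.pyGetD below c' []) a
          && PySem.Set.contains (PySem.List.pyGetD below c' []) b
          && PySem.Set.contains (PySem.List.pyGetD below d []) a
          && PySem.Set.contains (PySem.List.pyGetD below d []) b
          && PySem.Set.contains (PySem.List.pyGetD below d []) c'
      then some (a, b, c', d) else none
    | _ => none)

-- ===== PORT B =====
def analyze_lines_alt (reps : List Int) (adj : List (List Int)) : (List (Int × Int × Int × Int)) × Int × (List (Int × Int)) :=
  let n : Int := PySem.List.len reps
  let below := pvBelow adj n
  let quads := pvQuadsB below n
  let lines := PySem.List.sorted (PySem.Set.ofList quads) pvKey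
  -- lines_per_point = Counter(p for line in lines for p in line)
  let lines_per_point : PySem.Dict Int Int :=
    (lines.flatMap (fun line => [line.1, line.2.1, line.2.2.1, line.2.2.2])).foldl
      (fun d p => PySem.Dict.modify d p 0 (fun v => v + 1)) PySem.Dict.empty
  (lines, PySem.List.len lines, lines_per_point.items)

-- ===== PRECONDITION & SPEC =====
-- Pre_ is exactly where the Python A returns: A raises IndexError iff len(adj) < len(reps)
-- (building adj_s) or some entry x ≥ n of a row adj[i], i < n, is used as the index adj_s[x].
def Pre_analyze_lines (reps : List Int) (adj : List (List Int)) : Prop :=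
  reps.length ≤ adj.length ∧
    ∀ row ∈ adj.take reps.length, ∀ x ∈ row, x < (reps.length : Int)
instance (reps : List Int) (adj : List (List Int)) : Decidable (Pre_analyze_lines reps adj) := by
  unfold Pre_analyze_lines; infer_instance

def pvWitness_analyze_lines : List Int × List (List Int) :=
  ([0, 1, 2, 3], [[1, 2, 3], [0, 2, 3], [0, 1, 3], [0, 1, 2]])

def Spec_analyze_lines (reps : List Int) (adj : List (List Int)) (out : (List (Int × Int × Int × Int)) × Int × (List (Int × Int))) : Prop := out = analyze_lines_alt reps adj
instance (reps : List Int) (adj : List (List Int)) (out : (List (Int × Int × Int × Int)) × Int × (List (Int × Int))) : Decidable (Spec_analyze_lines reps adj out) := by unfold Spec_analyze_lines; infer_instance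

-- ===== CLAIM (what is proved, stated in full; the proofs are below) =====
def Claim_equal_analyze_lines : Prop := ∀ (reps : List Int) (adj : List (List Int)), Dom_analyze_lines reps adj → Pre_analyze_lines reps adj → Spec_analyze_lines reps adj (analyze_lines reps adj)


-- ===== LEMMAS AND PROOFS =====

theorem pvWitness_ok :
    Dom_analyze_lines pvWitness_analyze_lines.1 pvWitness_analyze_lines.2 ∧
      Pre_analyze_lines pvWitness_analyze_lines.1 pvWitness_analyze_lines.2 := by
  constructor
  · decide
  · unfold Pre_analyze_lines pvWitness_analyze_lines; decide

theorem pvKey_injective : Function.Injective pvKey := by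
  rintro ⟨a1, a2, a3, a4⟩ ⟨b1, b2, b3, b4⟩ h
  simp only [pvKey, toLex_inj, Prod.mk.injEq] at h
  obtain ⟨h1, h2, h3, h4⟩ := h
  simp_all

-- a Python 'for x in l: … acc += g(x) …' loop whose body only appends, as a flatMap
theorem pv_foldl_delta {α β : Type} (f : List β → α → List β) (g : α → List β)
    (h : ∀ acc x, f acc x = acc ++ g x) (l : List α) (acc : List β) :
    l.foldl f acc = acc ++ l.flatMap g := by
  rw [show f = fun acc x => acc ++ g x from funext fun a => funext fun x => h a x]
  exact PySem.List.foldl_append_eq_flatMap g l acc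

-- the common adjacency predicate both loop nests enumerate
def pvS (adj : List (List Int)) (x : Int) : PySem.Set Int :=
  PySem.Set.ofList (PySem.List.pyGetD adj x [])

def pvOK (adj : List (List Int)) (n : Int) (q : Int × Int × Int × Int) : Prop :=
  0 ≤ q.1 ∧ q.1 < q.2.1 ∧ q.2.1 < q.2.2.1 ∧ q.2.2.1 < q.2.2.2 ∧ q.2.2.2 < n ∧
  q.2.1 ∈ pvS adj q.1 ∧ q.2.2.1 ∈ pvS adj q.1 ∧ q.2.2.2 ∈ pvS adj q.1 ∧
  q.2.2.1 ∈ pvS adj q.2.1 ∧ q.2.2.2 ∈ pvS adj q.2.1 ∧ q.2.2.2 ∈ pvS adj q.2.2.1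

theorem pvAdjS_get (adj : List (List Int)) (n : ℕ) (i : Int) (h0 : 0 ≤ i) (h1 : i < (n : Int)) :
    PySem.List.pyGetD (pvAdjS adj (n : Int)) i [] = pvS adj i := by
  obtain ⟨k, rfl⟩ : ∃ k : ℕ, i = (k : Int) := ⟨i.toNat, (Int.toNat_of_nonneg h0).symm⟩
  unfold pvAdjS pvS
  exact PySem.List.pyGetD_map_pyRange _ n k [] (by exact_mod_cast h1)

theorem pvSorted4 {i j k l : Int} (h1 : i < j) (h2 : j < k) (h3 : k < l) :
    PySem.List.sorted [i, j, k, l] (fun x => x) = [i, j, k, l] := by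
  refine PySem.List.sorted_eq_of_perm_of_pairwise_lt _ _ _ (List.Perm.refl _) ?_
  simp [List.pairwise_cons]
  omega

-- A's loop nest, flattened to the flatMap it appends
theorem pvLinesA_eq (adj_s : List (PySem.Set Int)) (n : Int) :
    pvLinesA adj_s n =
      (PySem.List.pyRange 0 n).flatMap (fun i =>
        (PySem.List.pyGetD adj_s i []).flatMap (fun j =>
          if j ≤ i then [] else
            (PySem.Set.inter (PySem.List.pyGetD adj_s i []) (PySem.List.pyGetD adj_s j [])).flatMap (fun k =>
              if k ≤ j then [] else
              if k ∈ PySem.List.pyGetD adj_s j [] then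
                (PySem.Set.inter
                  (PySem.Set.inter (PySem.List.pyGetD adj_s i []) (PySem.List.pyGetD adj_s j []))
                  (PySem.List.pyGetD adj_s k [])).flatMap (fun l =>
                    if l ≤ k then [] else [pvQuad (PySem.List.sorted [i, j, k, l] (fun x => x))])
              else []))) := by
  unfold pvLinesA
  refine Eq.trans (pv_foldl_delta _ _ ?_ _ []) (List.nil_append _)
  intro acc i
  refine pv_foldl_delta _ _ ?_ _ _
  intro acc j
  by_cases hji : j ≤ i
  · simp [hji]
  simp only [hji, if_false]
  refine pv_foldl_delta _ _ ?_ _ _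
  intro acc k
  by_cases hkj : k ≤ j
  · simp [hkj]
  simp only [hkj, if_false]
  by_cases hc : k ∈ PySem.List.pyGetD adj_s j []
  · simp only [PySem.Set.contains_iff, hc, if_true]
    refine pv_foldl_delta _ _ ?_ _ _
    intro acc l
    by_cases hlk : l ≤ k
    · simp [hlk]
    · simp [hlk]
  · simp [hc]

theorem pv_sublist_range' : ∀ (l : List ℕ) (lo cnt : ℕ), l.Pairwise (· < ·) →
    (∀ x ∈ l, lo ≤ x ∧ x < lo + cnt) → l.Sublist (List.range' lo cnt)
  | [], lo, cnt, _, _ => List.nil_sublist _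
  | a :: t, lo, cnt, hp, hb => by
    obtain ⟨ha1, ha2⟩ := hb a (List.mem_cons_self)
    have hsplit : List.range' lo cnt = List.range' lo (a - lo) ++ a :: List.range' (a + 1) (cnt - (a - lo) - 1) := by
      have h1 := List.range'_append (s := lo) (m := a - lo) (n := cnt - (a - lo)) (step := 1)
      rw [show lo + 1 * (a - lo) = a by omega, show a - lo + (cnt - (a - lo)) = cnt by omega] at h1
      rw [← h1, show cnt - (a - lo) = (cnt - (a - lo) - 1) + 1 by omega, List.range'_succ,
        show cnt - (a - lo) - 1 + 1 - 1 = cnt - (a - lo) - 1 by omega]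
    rw [hsplit]
    have htail : t.Sublist (List.range' (a + 1) (cnt - (a - lo) - 1)) := by
      refine pv_sublist_range' t (a + 1) (cnt - (a - lo) - 1) hp.of_cons ?_
      intro x hx
      have hax : a < x := (List.pairwise_cons.1 hp).1 x hx
      have := hb x (List.mem_cons_of_mem a hx)
      omega
    exact (List.Sublist.cons₂ a htail).trans (List.sublist_append_right _ _)

theorem sublist_range_of_four {a b c d m : ℕ} (h1 : a < b) (h2 : b < c) (h3 : c < d) (h4 : d < m) :
    [a, b, c, d].Sublist (List.range m) := by
  rw [List.range_eq_range']
  refine pv_sublist_range' _ 0 m ?_ ?_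
  · simp [List.pairwise_cons]; omega
  · intro x hx; simp at hx; omega

theorem mem_pvLinesA_iff (adj : List (List Int)) (n : ℕ) (hlen : n ≤ adj.length)
    (hall : ∀ row ∈ adj.take n, ∀ x ∈ row, x < (n : Int)) (q : Int × Int × Int × Int) :
    q ∈ pvLinesA (pvAdjS adj (n : Int)) (n : Int) ↔ pvOK adj (n : Int) q := by
  have hrow : ∀ (i : Int), 0 ≤ i → i < (n : Int) → ∀ {x : Int}, x ∈ pvS adj i → x < (n : Int) := by
    intro i h0 h1 x hx
    rw [pvS, PySem.Set.mem_ofList] at hx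
    have hlen' : i < (adj.length : Int) := by omega
    rw [PySem.List.pyGetD_eq_getElem adj [] h0 hlen'] at hx
    refine hall adj[i.toNat] ?_ x hx
    have : (adj.take n)[i.toNat]'(by simp; omega) = adj[i.toNat]'(by omega) :=
      List.getElem_take
    exact this ▸ List.getElem_mem _
  rw [pvLinesA_eq]
  simp only [List.mem_flatMap, PySem.List.mem_pyRange_one]
  constructor
  · rintro ⟨i, ⟨h0i, h1i⟩, hq⟩
    rw [pvAdjS_get adj n i h0i h1i] at hq
    obtain ⟨j, hjS, hq⟩ := hq
    by_cases hji : j ≤ i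
    · simp [hji] at hq
    simp only [hji, if_false] at hq
    have h1j : j < (n : Int) := hrow i h0i h1i hjS
    have h0j : 0 ≤ j := by omega
    rw [pvAdjS_get adj n j h0j h1j, List.mem_flatMap] at hq
    obtain ⟨k, hkS, hq⟩ := hq
    rw [PySem.Set.mem_inter] at hkS
    obtain ⟨hki, hkj'⟩ := hkS
    by_cases hkj : k ≤ j
    · simp [hkj] at hq
    simp only [hkj, if_false] at hq
    have h1k : k < (n : Int) := hrow i h0i h1i hki
    have h0k : 0 ≤ k := by omega
    simp only [hkj', if_true] at hq
    rw [pvAdjS_get adj n k h0k h1k, List.mem_flatMap] at hq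
    obtain ⟨l, hlS, hq⟩ := hq
    rw [PySem.Set.mem_inter, PySem.Set.mem_inter] at hlS
    obtain ⟨⟨hli, hlj⟩, hlk'⟩ := hlS
    by_cases hlk : l ≤ k
    · simp [hlk] at hq
    simp only [hlk, if_false, List.mem_singleton] at hq
    have h1l : l < (n : Int) := hrow i h0i h1i hli
    rw [pvSorted4 (by omega) (by omega) (by omega)] at hq
    subst hq
    simp only [pvQuad, pvOK]
    exact ⟨h0i, by omega, by omega, by omega, h1l, hjS, hki, hli, hkj', hlj, hlk'⟩
  · intro hok
    obtain ⟨a, b, c, d⟩ := q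
    obtain ⟨h0a, hab, hbc, hcd, hdn, hba, hca, hda, hcb, hdb, hdc⟩ := hok
    simp only at h0a hab hbc hcd hdn hba hca hda hcb hdb hdc
    have h1a : a < (n : Int) := by omega
    have h0b : 0 ≤ b := by omega
    have h1b : b < (n : Int) := by omega
    have h0c : 0 ≤ c := by omega
    have h1c : c < (n : Int) := by omega
    refine ⟨a, ⟨h0a, h1a⟩, ?_⟩
    rw [pvAdjS_get adj n a h0a h1a]
    refine ⟨b, hba, ?_⟩
    simp only [show ¬ b ≤ a by omega, if_false]
    rw [pvAdjS_get adj n b h0b h1b, List.mem_flatMap]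
    refine ⟨c, PySem.Set.mem_inter .. |>.2 ⟨hca, hcb⟩, ?_⟩
    simp only [show ¬ c ≤ b by omega, if_false, hcb, if_true]
    rw [pvAdjS_get adj n c h0c h1c, List.mem_flatMap]
    refine ⟨d, ?_, ?_⟩
    · rw [PySem.Set.mem_inter, PySem.Set.mem_inter]
      exact ⟨⟨hda, hdb⟩, hdc⟩
    · simp only [show ¬ d ≤ c by omega, if_false, List.mem_singleton]
      rw [pvSorted4 hab hbc hcd]
      rfl

theorem pvBelow_inner (row : List Int) (i : Int) (hi0 : 0 ≤ i) (st : List (PySem.Set Int)) :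
    ((row.foldl (fun below j =>
        if i < j then
          PySem.List.pySetD below j (PySem.Set.add (PySem.List.pyGetD below j []) i)
        else below) st).length = st.length) ∧
    ∀ (b : Int), 0 ≤ b → b < (st.length : Int) → ∀ x,
      (x ∈ PySem.List.pyGetD (row.foldl (fun below j =>
          if i < j then
            PySem.List.pySetD below j (PySem.Set.add (PySem.List.pyGetD below j []) i)
          else below) st) b [] ↔
        x ∈ PySem.List.pyGetD st b [] ∨ (x = i ∧ i < b ∧ b ∈ row)) := by
  induction row generalizing st with
  | nil => exact ⟨rfl, fun b _ _ x => by simp⟩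
  | cons j t ih =>
    by_cases hij : i < j
    · have hst' := ih (PySem.List.pySetD st j (PySem.Set.add (PySem.List.pyGetD st j []) i))
      constructor
      · simp only [List.foldl_cons, if_pos hij]
        rw [hst'.1, PySem.List.length_pySetD]
      · intro b hb0 hb1 x
        simp only [List.foldl_cons, if_pos hij]
        rw [hst'.2 b hb0 (by rw [PySem.List.length_pySetD]; exact hb1) x]
        by_cases hjb : j = b
        · subst hjb
          have hget : PySem.List.pyGetD (PySem.List.pySetD st j (PySem.Set.add (PySem.List.pyGetD st j []) i)) j [] = PySem.Set.add (PySem.List.pyGetD st j []) i := by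
            have hjn : j.toNat < st.length := by omega
            rw [PySem.List.pySetD_of_nonneg st _ hb0]
            rw [PySem.List.pyGetD_eq_getElem _ [] hb0 (by rw [List.length_set]; exact hb1)]
            exact List.getElem_set_self (by simpa using hjn)
          rw [hget]
          constructor
          · rintro (h | h)
            · rcases (PySem.Set.mem_add ..).1 h with h' | h'
              · exact Or.inl h'
              · exact Or.inr ⟨h', hij, by simp⟩
            · exact Or.inr ⟨h.1, h.2.1, List.mem_cons_of_mem _ h.2.2⟩
          · rintro (h | ⟨rfl, hib, hmem⟩)
            · exact Or.inl ((PySem.Set.mem_add ..).2 (Or.inl h))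
            · exact Or.inl ((PySem.Set.mem_add ..).2 (Or.inr rfl))
        · have hget : PySem.List.pyGetD (PySem.List.pySetD st j (PySem.Set.add (PySem.List.pyGetD st j []) i)) b [] = PySem.List.pyGetD st b [] := by
            have hj0 : 0 ≤ j := by omega
            have hne' : j.toNat ≠ b.toNat := by omega
            rw [PySem.List.pySetD_of_nonneg st _ hj0]
            by_cases hjr : j.toNat < st.length
            · rw [PySem.List.pyGetD_eq_getElem _ [] hb0 (by rw [List.length_set]; exact hb1)]
              rw [PySem.List.pyGetD_eq_getElem st [] hb0 hb1]
              exact List.getElem_set_ne hne' (by simp; omega)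
            · rw [List.set_eq_of_length_le (by omega)]
          rw [hget]
          constructor
          · rintro (h | h)
            · exact Or.inl h
            · exact Or.inr ⟨h.1, h.2.1, List.mem_cons_of_mem _ h.2.2⟩
          · rintro (h | ⟨rfl, hib, hmem⟩)
            · exact Or.inl h
            · rcases List.mem_cons.1 hmem with rfl | h'
              · omega
              · exact Or.inr ⟨rfl, hib, h'⟩
    · have hst' := ih st
      constructor
      · simp only [List.foldl_cons, if_neg hij]
        exact hst'.1
      · intro b hb0 hb1 x
        simp only [List.foldl_cons, if_neg hij]
        rw [hst'.2 b hb0 hb1 x]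
        constructor
        · rintro (h | h)
          · exact Or.inl h
          · exact Or.inr ⟨h.1, h.2.1, List.mem_cons_of_mem _ h.2.2⟩
        · rintro (h | ⟨rfl, hib, hmem⟩)
          · exact Or.inl h
          · rcases List.mem_cons.1 hmem with rfl | h'
            · omega
            · exact Or.inr ⟨rfl, hib, h'⟩

theorem pvBelow_outer (adj : List (List Int)) :
    ∀ (is : List Int), (∀ i ∈ is, 0 ≤ i) → ∀ (st : List (PySem.Set Int)),
    ((is.foldl (fun below i =>
        (PySem.List.pyGetD adj i []).foldl (fun below j =>
          if i < j then
            PySem.List.pySetD below j (PySem.Set.add (PySem.List.pyGetD below j []) i)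
          else below) below) st).length = st.length) ∧
    ∀ (b : Int), 0 ≤ b → b < (st.length : Int) → ∀ x,
      (x ∈ PySem.List.pyGetD (is.foldl (fun below i =>
          (PySem.List.pyGetD adj i []).foldl (fun below j =>
            if i < j then
              PySem.List.pySetD below j (PySem.Set.add (PySem.List.pyGetD below j []) i)
            else below) below) st) b [] ↔
        x ∈ PySem.List.pyGetD st b [] ∨ (x ∈ is ∧ x < b ∧ b ∈ PySem.List.pyGetD adj x []))
  | [], _, st => ⟨rfl, fun b _ _ x => by simp⟩
  | i :: t, his, st => by
    have hin := pvBelow_inner (PySem.List.pyGetD adj i []) i (his i List.mem_cons_self) st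
    have hrec := pvBelow_outer adj t (fun i' hi' => his i' (List.mem_cons_of_mem _ hi'))
      ((PySem.List.pyGetD adj i []).foldl (fun below j =>
        if i < j then
          PySem.List.pySetD below j (PySem.Set.add (PySem.List.pyGetD below j []) i)
        else below) st)
    constructor
    · simp only [List.foldl_cons]
      rw [hrec.1, hin.1]
    · intro b hb0 hb1 x
      simp only [List.foldl_cons]
      rw [hrec.2 b hb0 (by rw [hin.1]; exact hb1) x, hin.2 b hb0 hb1 x]
      constructor
      · rintro ((h | h) | h)
        · exact Or.inl h
        · obtain ⟨rfl, hib, hrow⟩ := h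
          exact Or.inr ⟨List.mem_cons_self, hib, hrow⟩
        · exact Or.inr ⟨List.mem_cons_of_mem _ h.1, h.2.1, h.2.2⟩
      · rintro (h | ⟨hmem, hxb, hrow⟩)
        · exact Or.inl (Or.inl h)
        · rcases List.mem_cons.1 hmem with rfl | h'
          · exact Or.inl (Or.inr ⟨rfl, hxb, hrow⟩)
          · exact Or.inr ⟨h', hxb, hrow⟩

theorem pvBelow_get (adj : List (List Int)) (n : ℕ) (b : Int) (hb0 : 0 ≤ b) (hbn : b < (n : Int)) :
    ∀ x, x ∈ PySem.List.pyGetD (pvBelow adj (n : Int)) b [] ↔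
      (0 ≤ x ∧ x < b ∧ b ∈ PySem.List.pyGetD adj x []) := by
  intro x
  have hinitlen : ((PySem.List.pyRange 0 (n : Int)).map (fun _ => ([] : PySem.Set Int))).length = n := by
    rw [List.length_map, PySem.List.pyRange_zero_natCast, List.length_map, List.length_range]
  have h := (pvBelow_outer adj (PySem.List.pyRange 0 (n : Int))
    (fun i hi => (PySem.List.mem_pyRange_one.1 hi).1)
    ((PySem.List.pyRange 0 (n : Int)).map (fun _ => ([] : PySem.Set Int)))).2 b hb0
    (by rw [hinitlen]; exact hbn) x
  unfold pvBelow
  rw [h]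
  have hinit : PySem.List.pyGetD ((PySem.List.pyRange 0 (n : Int)).map (fun _ => ([] : PySem.Set Int))) b [] = [] := by
    obtain ⟨k, rfl⟩ : ∃ k : ℕ, b = (k : Int) := ⟨b.toNat, (Int.toNat_of_nonneg hb0).symm⟩
    exact PySem.List.pyGetD_map_pyRange _ n k [] (by exact_mod_cast hbn)
  rw [hinit]
  simp only [List.not_mem_nil, false_or, PySem.List.mem_pyRange_one]
  constructor
  · rintro ⟨⟨h0, h1⟩, h2, h3⟩
    exact ⟨h0, h2, h3⟩
  · rintro ⟨h0, h2, h3⟩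
    exact ⟨⟨h0, by omega⟩, h2, h3⟩

theorem mem_pvQuadsB_iff (adj : List (List Int)) (n : ℕ) (q : Int × Int × Int × Int) :
    q ∈ pvQuadsB (pvBelow adj (n : Int)) (n : Int) ↔ pvOK adj (n : Int) q := by
  unfold pvQuadsB
  rw [List.mem_filterMap]
  constructor
  · rintro ⟨c, hc, hsome⟩
    obtain ⟨hsub, hlen4⟩ := (PySem.List.mem_combinations_iff _ _ _).1 hc
    match c, hlen4 with
    | [a, b, c', d], _ =>
      have hbnd : ∀ x ∈ [a, b, c', d], 0 ≤ x ∧ x < (n : Int) := fun x hx =>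
        PySem.List.mem_pyRange_one.1 (hsub.subset hx)
      obtain ⟨h0a, h1a⟩ := hbnd a (by simp)
      obtain ⟨h0b, h1b⟩ := hbnd b (by simp)
      obtain ⟨h0c, h1c⟩ := hbnd c' (by simp)
      obtain ⟨h0d, h1d⟩ := hbnd d (by simp)
      simp only at hsome
      by_cases hcond : (PySem.Set.contains (PySem.List.pyGetD (pvBelow adj (n : Int)) b []) a
          && PySem.Set.contains (PySem.List.pyGetD (pvBelow adj (n : Int)) c' []) a
          && PySem.Set.contains (PySem.List.pyGetD (pvBelow adj (n : Int)) c' []) b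
          && PySem.Set.contains (PySem.List.pyGetD (pvBelow adj (n : Int)) d []) a
          && PySem.Set.contains (PySem.List.pyGetD (pvBelow adj (n : Int)) d []) b
          && PySem.Set.contains (PySem.List.pyGetD (pvBelow adj (n : Int)) d []) c') = true
      · rw [if_pos hcond] at hsome
        obtain rfl : (a, b, c', d) = q := Option.some.injEq .. ▸ hsome
        simp only [Bool.and_eq_true, PySem.Set.contains_iff,
          pvBelow_get adj n b h0b h1b, pvBelow_get adj n c' h0c h1c,
          pvBelow_get adj n d h0d h1d] at hcond
        obtain ⟨⟨⟨⟨⟨⟨_, hab, hba⟩, ⟨_, hac, hca⟩⟩, ⟨_, hbc, hcb⟩⟩, ⟨_, had, hda⟩⟩, ⟨_, hbd, hdb⟩⟩, ⟨_, hcd, hdc⟩⟩ := hcond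
        refine ⟨h0a, hab, hbc, hcd, h1d, ?_, ?_, ?_, ?_, ?_, ?_⟩ <;>
          simp only [pvS, PySem.Set.mem_ofList] <;> assumption
      · rw [if_neg hcond] at hsome
        exact absurd hsome (by simp)
  · intro hok
    obtain ⟨a, b, c', d⟩ := q
    obtain ⟨h0a, hab, hbc, hcd, hdn, hba, hca, hda, hcb, hdb, hdc⟩ := hok
    simp only [pvS, PySem.Set.mem_ofList] at hba hca hda hcb hdb hdc
    simp only at h0a hab hbc hcd hdn
    refine ⟨[a, b, c', d], ?_, ?_⟩
    · refine (PySem.List.mem_combinations_iff _ _ _).2 ⟨?_, rfl⟩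
      rw [PySem.List.pyRange_zero_natCast]
      have hmap : ([a, b, c', d] : List Int) =
          List.map (fun k : ℕ => (k : Int)) [a.toNat, b.toNat, c'.toNat, d.toNat] := by
        simp [h0a, show (0 : Int) ≤ b by omega,
          show (0 : Int) ≤ c' by omega, show (0 : Int) ≤ d by omega]
      rw [hmap]
      refine List.Sublist.map _ (sublist_range_of_four ?_ ?_ ?_ ?_) <;> omega
    · simp only
      have hcond : (PySem.Set.contains (PySem.List.pyGetD (pvBelow adj (n : Int)) b []) a
          && PySem.Set.contains (PySem.List.pyGetD (pvBelow adj (n : Int)) c' []) a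
          && PySem.Set.contains (PySem.List.pyGetD (pvBelow adj (n : Int)) c' []) b
          && PySem.Set.contains (PySem.List.pyGetD (pvBelow adj (n : Int)) d []) a
          && PySem.Set.contains (PySem.List.pyGetD (pvBelow adj (n : Int)) d []) b
          && PySem.Set.contains (PySem.List.pyGetD (pvBelow adj (n : Int)) d []) c') = true := by
        simp only [Bool.and_eq_true, PySem.Set.contains_iff,
          pvBelow_get adj n b (by omega) (by omega), pvBelow_get adj n c' (by omega) (by omega),
          pvBelow_get adj n d (by omega) (by omega)]
        exact ⟨⟨⟨⟨⟨⟨h0a, hab, hba⟩, ⟨h0a, by omega, hca⟩⟩, ⟨by omega, hbc, hcb⟩⟩,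
          ⟨h0a, by omega, hda⟩⟩, ⟨by omega, by omega, hdb⟩⟩, ⟨by omega, hcd, hdc⟩⟩
      rw [if_pos hcond]

-- ===== VERDICT (by name: the statement is the Claim_ definition above) =====
theorem analyze_lines_spec : Claim_equal_analyze_lines := by
  intro reps adj _ hpre
  obtain ⟨hlen, hall⟩ := hpre
  unfold Spec_analyze_lines analyze_lines analyze_lines_alt
  have hsort :
      PySem.List.sorted (PySem.Set.ofList (pvLinesA (pvAdjS adj (PySem.List.len reps)) (PySem.List.len reps))) pvKey =
      PySem.List.sorted (PySem.Set.ofList (pvQuadsB (pvBelow adj (PySem.List.len reps)) (PySem.List.len reps))) pvKey := by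
    have hlenr : PySem.List.len reps = (reps.length : Int) := rfl
    rw [hlenr]
    refine PySem.List.eq_of_perm_of_pairwise_le_of_injective pvKey pvKey_injective ?_
      (PySem.List.sorted_pairwise _ _) (PySem.List.sorted_pairwise _ _)
    refine (PySem.List.sorted_perm _ _ _).trans (List.Perm.trans ?_ (PySem.List.sorted_perm _ _ _).symm)
    refine (List.perm_ext_iff_of_nodup (PySem.Set.nodup_ofList _) (PySem.Set.nodup_ofList _)).2 ?_
    intro q
    rw [PySem.Set.mem_ofList, PySem.Set.mem_ofList,
      mem_pvLinesA_iff adj reps.length hlen hall q, mem_pvQuadsB_iff adj reps.length q]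
  simp only [hsort, List.foldl_flatMap]
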